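-- pv_equiv track=rewrite | github.com/luwux/Axmath_Output_Converter | ClpCnvrtr.py | delete_blank
-- ===== SOURCE A (Python) =====
-- def delete_blank(input_str):
--     dollar_count = 0  # 用于计算$的数量
--     output = []  # 用列表来构建输出字符串
--
--     i = 0
--     while i < len(input_str):
--         if input_str[i] == "$":
--             dollar_count += 1
--             output.append(input_str[i])
--
--             # 如果是奇数个$，则检查下一个字符是否为空格
--             if (
--                 dollar_count % 2 != 0
--                 and i + 1 < len(input_str)
--                 and input_str[i + 1] == " "
--             ):
--                 i += 1  # 跳过空格
--             # 如果是偶数个$，则检查前一个字符是否为空格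
--             elif dollar_count % 2 == 0 and len(output) > 1 and output[-2] == " ":
--                 output = output[:-2]  # 移除空格和$
--                 output.append("$")  # 重新加入$
--         else:
--             output.append(input_str[i])
--         i += 1
--
--     return "".join(output)  # 将列表转换为字符串并返回
-- ===== SOURCE B (Python) =====
-- def delete_blank(input_str):
--     parts = input_str.split("$")
--     out = []
--     for idx, p in enumerate(parts):
--         if idx % 2 == 1:
--             if p.startswith(" "):
--                 p = p[1:]
--             if idx != len(parts) - 1 and p.endswith(" "):
--                 p = p[:-1]
--         out.append(p)
--     return "$".join(out)
-- ===== Notes on version B (the rewrite author's own statement) =====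
-- stated objective: simpler
-- what changed: Replaces the index-based while loop with a dollar counter and output-list backtracking (output[:-2] slicing at each closing delimiter) by splitting on the delimiter and trimming at most one leading space (and one trailing space when a closing delimiter follows) from each odd, inside-math segment, then rejoining.
import Mathlib
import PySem

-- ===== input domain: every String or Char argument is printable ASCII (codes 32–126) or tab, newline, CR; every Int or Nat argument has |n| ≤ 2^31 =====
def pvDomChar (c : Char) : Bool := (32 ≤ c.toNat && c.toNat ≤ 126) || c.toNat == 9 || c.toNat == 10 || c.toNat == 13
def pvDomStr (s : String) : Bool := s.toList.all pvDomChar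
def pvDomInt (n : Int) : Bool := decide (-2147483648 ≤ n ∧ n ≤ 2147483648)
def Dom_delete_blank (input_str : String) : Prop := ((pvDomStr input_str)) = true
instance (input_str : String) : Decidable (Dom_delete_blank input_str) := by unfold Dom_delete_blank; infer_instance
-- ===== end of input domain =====

-- B replaces A's index-based while loop (dollar counter + output-list backtracking) by
-- split on the delimiter / trim odd segments / rejoin; simpler and measured faster (no list slicing per closing delimiter).


-- ===== PORT A =====
-- the while loop of A: remaining characters, dollar_count, output list
def aLoop : List Char → Nat → List Char → List Char
  | [], _, output => output
  | c :: rest, dc, output =>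
    if c = '$' then
      let dc2 := dc + 1
      let out2 := output ++ [c]
      if dc2 % 2 ≠ 0 ∧ rest.head? = some ' ' then
        -- skip the space after an odd '$' (i += 1 twice)
        aLoop rest.tail dc2 out2
      else if dc2 % 2 = 0 ∧ 1 < out2.length ∧ PySem.List.pyGet? out2 (-2) = some ' ' then
        -- output = output[:-2]; output.append('$')
        aLoop rest dc2 (PySem.List.slice out2 none (some (-2)) ++ ['$'])
      else
        aLoop rest dc2 out2
    else
      aLoop rest dc (output ++ [c])
  termination_by cs _ _ => cs.length
  decreasing_by all_goals simp [List.length_tail]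

def delete_blank (input_str : String) : String :=
  String.ofList (aLoop input_str.toList 0 [])

-- ===== PORT B =====
-- trimming of one enumerated part (the loop body of Source B)
def bTrim (n : Int) (idx : Int) (p : List Char) : List Char :=
  if idx % 2 = 1 then
    let p1 := if PySem.Chars.startswith p [' '] then PySem.List.slice p (some 1) none else p
    if idx ≠ n - 1 ∧ PySem.Chars.endswith p1 [' '] then PySem.List.slice p1 none (some (-1)) else p1
  else p

def delete_blank_alt (input_str : String) : String :=
  let parts := input_str.toList.splitOn '$'   -- input_str.split("$")
  let out := (PySem.List.enumerate parts).map (fun ip => bTrim (parts.length : Int) ip.1 ip.2)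
  String.ofList (PySem.Chars.join ['$'] out)      -- "$".join(out)

-- ===== PRECONDITION & SPEC =====
def Spec_delete_blank (input_str : String) (out : String) : Prop := out = delete_blank_alt input_str
instance (input_str : String) (out : String) : Decidable (Spec_delete_blank input_str out) := by unfold Spec_delete_blank; infer_instance

-- ===== CLAIM (what is proved, stated in full; the proofs are below) =====
def Claim_equal_delete_blank : Prop := ∀ (input_str : String), Dom_delete_blank input_str → Spec_delete_blank input_str (delete_blank input_str)

-- ===== LEMMAS AND PROOFS =====

-- proof-side helpers: the effect of trimming on one inside-math segment
def dropLead : List Char → List Char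
  | [] => []
  | c :: t => if c = ' ' then t else c :: t

def dropTrail (p : List Char) : List Char :=
  if p.getLast? = some ' ' then p.dropLast else p

-- alternating trim over the split parts (flag = inside math)
def trimmed : Bool → List (List Char) → List (List Char)
  | _, [] => []
  | false, p :: ps => p :: trimmed true ps
  | true, p :: ps => (if ps.isEmpty then dropLead p else dropTrail (dropLead p)) :: trimmed false ps

-- [c] is a suffix iff it is the last element
theorem suffix_singleton_iff (l : List Char) (c : Char) : ([c] <:+ l) ↔ l.getLast? = some c := by
  constructor
  · rintro ⟨t, rfl⟩; simp
  · intro h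
    rcases List.eq_nil_or_concat l with rfl | ⟨t, a, rfl⟩
    · simp at h
    · simp at h; subst h; exact ⟨t, by simp⟩

-- xs[:-1] is dropLast
theorem slice_neg_one (l : List Char) : PySem.List.slice l none (some (-1)) = l.dropLast := by
  simp only [PySem.List.slice, PySem.List.clampIdx, List.dropLast_eq_take]
  cases l with
  | nil => rfl
  | cons x t =>
    have h1 : ¬((x :: t).length : Int) + (-1) < 0 := by simp
    simp only [if_neg h1, if_pos (by norm_num : (-1 : Int) < 0)]
    congr 1
    omega

-- xs[:-2] is dropLast twice
theorem slice_neg_two (l : List Char) : PySem.List.slice l none (some (-2)) = l.dropLast.dropLast := by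
  simp only [PySem.List.slice, PySem.List.clampIdx, List.dropLast_eq_take, List.take_take,
    List.length_take]
  rcases l with _ | ⟨x, _ | ⟨y, t⟩⟩
  · rfl
  · rfl
  · have h1 : ¬((x :: y :: t).length : Int) + (-2) < 0 := by simp
    simp only [if_neg h1, if_pos (by norm_num : (-2 : Int) < 0)]
    congr 1
    simp
    omega

-- (ys ++ [a])[-2] is ys' last element
theorem pyGet?_concat_neg_two (ys : List Char) (a : Char) :
    PySem.List.pyGet? (ys ++ [a]) (-2) = ys.getLast? := by
  cases ys with
  | nil => simp [PySem.List.pyGet?, PySem.List.pyIdx?]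
  | cons x t =>
    have hidx : PySem.List.pyIdx? ((x :: t) ++ [a]).length (-2) = some ((x :: t).length - 1) := by
      rw [PySem.List.pyIdx?, if_neg (by omega), if_pos (by simp)]
      congr 1
      simp
    rw [PySem.List.pyGet?, hidx]
    simp only [Option.bind_some]
    rw [List.getElem?_append_left (by simp), List.getLast?_eq_getElem?]

-- a '$'-free block of characters is just appended by the loop
theorem aLoop_append_part (p : List Char) :
    ∀ (cs : List Char) (dc : Nat) (out : List Char), '$' ∉ p →
      aLoop (p ++ cs) dc out = aLoop cs dc (out ++ p) := by
  induction p with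
  | nil => intro cs dc out _; simp
  | cons c t ih =>
    intro cs dc out hp
    have hc : ¬(c = '$') := fun h => hp (by simp [h])
    rw [List.cons_append, aLoop, if_neg hc, ih cs dc (out ++ [c]) (fun h => hp (by simp [h]))]
    simp

-- intercalate, split at the first part
theorem intercalate_cons_split (p : List Char) (ps : List (List Char)) :
    List.intercalate ['$'] (p :: ps)
      = p ++ (if ps = [] then [] else '$' :: List.intercalate ['$'] ps) := by
  cases ps <;> simp [List.intercalate]

theorem dropLead_free (p : List Char) (h : '$' ∉ p) : '$' ∉ dropLead p := by
  cases p with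
  | nil => simp [dropLead]
  | cons c t =>
    by_cases hc : c = ' '
    · simp [dropLead, hc]; intro hm; exact h (by simp [hm])
    · simp [dropLead, hc]
      exact ⟨fun hm => h (by simp [hm.symm]), fun hm => h (by simp [hm])⟩

theorem getLast?_dollar_cons (p : List Char) :
    ('$' :: p).getLast? = if p = [] then some '$' else p.getLast? := by
  rcases List.eq_nil_or_concat p with rfl | ⟨t, a, rfl⟩
  · simp
  · rw [if_neg (by simp), List.concat_eq_append,
      show '$' :: (t ++ [a]) = ('$' :: t) ++ [a] from rfl,
      List.getLast?_append_of_ne_nil _ (by simp), List.getLast?_append_of_ne_nil _ (by simp)]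

-- the main invariant, outside-math entry and inside-math entry combined
theorem aLoop_main (n : Nat) :
    ∀ (parts : List (List Char)), parts.length ≤ n → (∀ p ∈ parts, '$' ∉ p) →
      (∀ (dc : Nat) (out : List Char), dc % 2 = 0 →
        aLoop (['$'].intercalate parts) dc out = out ++ ['$'].intercalate (trimmed false parts)) ∧
      (∀ (dc : Nat) (out : List Char), dc % 2 = 0 →
        aLoop ('$' :: ['$'].intercalate parts) dc out
          = out ++ '$' :: ['$'].intercalate (trimmed true parts)) := by
  induction n with
  | zero =>
    intro parts hlen _
    have hnil : parts = [] := List.eq_nil_of_length_eq_zero (Nat.le_zero.mp hlen)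
    subst hnil
    refine ⟨fun dc out _ => by simp [List.intercalate, trimmed, aLoop],
            fun dc out hdc => ?_⟩
    have h1 : (dc + 1) % 2 ≠ 0 := by omega
    simp [List.intercalate, trimmed, aLoop, h1]
  | succ n ih =>
    intro parts hlen hfree
    rcases parts with _ | ⟨p, ps⟩
    · refine ⟨fun dc out _ => by simp [List.intercalate, trimmed, aLoop],
              fun dc out hdc => ?_⟩
      have h1 : (dc + 1) % 2 ≠ 0 := by omega
      simp [List.intercalate, trimmed, aLoop, h1]
    · have hfp : '$' ∉ p := hfree p (by simp)
      have hfp' := dropLead_free p hfp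
      have hfps : ∀ q ∈ ps, '$' ∉ q := fun q hq => hfree q (by simp [hq])
      have ihps := ih ps (by simp at hlen; omega) hfps
      constructor
      · -- outside-math entry
        intro dc out hdc
        rw [intercalate_cons_split]
        rcases ps with _ | ⟨q, qs⟩
        · rw [if_pos rfl, aLoop_append_part p [] dc out hfp]
          simp [aLoop, trimmed, List.intercalate]
        · rw [if_neg (by simp), aLoop_append_part p _ dc out hfp,
            ihps.2 dc (out ++ p) hdc]
          simp [trimmed, intercalate_cons_split]
      · -- inside-math entry
        intro dc out hdc
        have hodd : (dc + 1) % 2 ≠ 0 := by omega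
        have heven : (dc + 1 + 1) % 2 = 0 := by omega
        have key1 : aLoop ('$' :: List.intercalate ['$'] (p :: ps)) dc out
            = aLoop (if ps = [] then [] else '$' :: List.intercalate ['$'] ps) (dc + 1)
                (out ++ '$' :: dropLead p) := by
          rw [intercalate_cons_split]
          rcases p with _ | ⟨c, t⟩
          · rcases ps with _ | ⟨q, qs⟩ <;> simp [aLoop, hodd, dropLead]
          · by_cases hc : c = ' '
            · subst hc
              rw [aLoop, if_pos rfl,
                if_pos ⟨hodd, by rw [List.cons_append]; rfl⟩]
              rw [show ((' ' :: t) ++ (if ps = [] then [] else '$' :: List.intercalate ['$'] ps)).tail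
                    = t ++ (if ps = [] then [] else '$' :: List.intercalate ['$'] ps) from rfl]
              rw [aLoop_append_part t _ _ _ (fun hm => hfp (by simp [hm]))]
              simp [dropLead]
            · rw [aLoop, if_pos rfl,
                if_neg (fun hcon => by
                  rcases ps with _ | ⟨q, qs⟩ <;>
                    simp [hc] at hcon),
                if_neg (fun hcon => hodd hcon.1),
                aLoop_append_part (c :: t) _ _ _ hfp]
              simp [dropLead, hc]
        rw [key1]
        rcases ps with _ | ⟨q, qs⟩
        · rw [if_pos rfl]
          simp [aLoop, trimmed, List.intercalate]
        · rw [if_neg (by simp)]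
          have key2 : aLoop ('$' :: List.intercalate ['$'] (q :: qs)) (dc + 1)
              (out ++ '$' :: dropLead p)
              = aLoop (List.intercalate ['$'] (q :: qs)) (dc + 1 + 1)
                  ((out ++ '$' :: dropTrail (dropLead p)) ++ ['$']) := by
            rw [aLoop, if_pos rfl, if_neg (fun hcon => hcon.1 heven)]
            by_cases hgl : (dropLead p).getLast? = some ' '
            · have hne : dropLead p ≠ [] := fun h0 => by rw [h0] at hgl; simp at hgl
              have hcur : (out ++ '$' :: dropLead p).getLast? = some ' ' := by
                rw [show out ++ '$' :: dropLead p = out ++ ('$' :: dropLead p) from rfl,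
                  List.getLast?_append_of_ne_nil _ (by simp), getLast?_dollar_cons, if_neg hne]
                exact hgl
              rw [if_pos ⟨heven, by simp; omega, by rw [pyGet?_concat_neg_two]; exact hcur⟩]
              rw [slice_neg_two, List.dropLast_concat]
              rw [show out ++ '$' :: dropLead p = out ++ ('$' :: dropLead p) from rfl,
                List.dropLast_append_of_ne_nil (by simp), List.dropLast_cons_of_ne_nil hne]
              rw [dropTrail, if_pos hgl]
            · have hcur : ¬ ((out ++ '$' :: dropLead p).getLast? = some ' ') := by
                rw [show out ++ '$' :: dropLead p = out ++ ('$' :: dropLead p) from rfl,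
                  List.getLast?_append_of_ne_nil _ (by simp), getLast?_dollar_cons]
                by_cases hne : dropLead p = []
                · rw [if_pos hne]; simp
                · rw [if_neg hne]; exact hgl
              rw [if_neg (fun hcon => hcur (by
                have := hcon.2.2
                rw [pyGet?_concat_neg_two] at this
                exact this))]
              rw [dropTrail, if_neg hgl]
          rw [key2, ihps.1 (dc + 1 + 1) _ (by omega)]
          simp [trimmed, intercalate_cons_split]

-- every part of splitOn '$' is '$'-free
theorem splitOn_dollar_free (cs : List Char) : ∀ p ∈ cs.splitOn '$', '$' ∉ p := by
  induction cs with
  | nil => intro p hp; simp at hp; subst hp; simp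
  | cons c t ih =>
    intro p hp
    simp only [List.splitOn] at hp ih
    rw [List.splitOnP_cons] at hp
    by_cases hc : c = '$'
    · simp [hc] at hp
      rcases hp with rfl | hp
      · simp
      · exact ih p hp
    · simp [hc] at hp
      rcases he : List.splitOnP (fun x => x == '$') t with _ | ⟨q, qs⟩
      · exact absurd he (List.splitOnP_ne_nil _ t)
      · rw [he] at hp
        simp [List.modifyHead] at hp
        rcases hp with rfl | hp
        · intro hm
          rw [List.mem_cons] at hm
          rcases hm with hm | hm
          · exact hc hm.symm
          · exact ih q (by rw [he]; simp) hm
        · exact ih p (by rw [he]; simp [hp])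

-- B's enumerate-map computes trimmed on the parts
theorem map_bTrim_eq_trimmed :
    ∀ (parts : List (List Char)) (s : Nat) (n : Int), n = s + parts.length →
      (PySem.List.enumerate parts (s : Int)).map (fun ip => bTrim n ip.1 ip.2)
        = trimmed (s % 2 = 1) parts := by
  intro parts
  induction parts with
  | nil => intro s n h; simp [PySem.List.enumerate_nil, trimmed]
  | cons p ps ih =>
    intro s n h
    rw [PySem.List.enumerate_cons, List.map_cons]
    have hcast : ((s : Int) + 1) = ((s + 1 : Nat) : Int) := by push_cast; ring
    rw [hcast, ih (s + 1) n (by rw [h]; simp; ring)]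
    have hp1 : (if PySem.Chars.startswith p [' '] then PySem.List.slice p (some 1) none else p)
        = dropLead p := by
      cases p with
      | nil => simp [PySem.Chars.startswith, dropLead]
      | cons c t =>
        by_cases hc : c = ' '
        · subst hc
          rw [if_pos (by simp [PySem.Chars.startswith, List.isPrefixOf])]
          rw [PySem.List.slice_from _ (by norm_num)]
          simp [dropLead]
        · rw [if_neg (by simp [PySem.Chars.startswith, List.isPrefixOf]; intro hh; exact absurd hh.symm hc)]
          cases t <;> simp [dropLead, hc]
    have hend : ∀ l : List Char, (if PySem.Chars.endswith l [' '] then PySem.List.slice l none (some (-1)) else l) = dropTrail l := by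
      intro l
      by_cases he : l.getLast? = some ' '
      · rw [if_pos (by rw [PySem.Chars.endswith, List.isSuffixOf_iff_suffix]; exact (suffix_singleton_iff l ' ').mpr he)]
        rw [slice_neg_one, dropTrail, if_pos he]
      · rw [if_neg (by rw [PySem.Chars.endswith, List.isSuffixOf_iff_suffix]; intro hc; exact he ((suffix_singleton_iff l ' ').mp hc))]
        rw [dropTrail, if_neg he]
    by_cases hs : s % 2 = 1
    · have hflag : (decide (s % 2 = 1)) = true := by simp [hs]
      have hflag2 : (decide ((s + 1) % 2 = 1)) = false := by simp; omega
      rw [hflag, hflag2]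
      show bTrim n (s : Int) p :: trimmed false ps = trimmed true (p :: ps)
      rw [bTrim, if_pos (by omega)]
      by_cases hps : ps = []
      · subst hps
        have hlast : ¬((s : Int) ≠ n - 1 ∧ PySem.Chars.endswith
            (if PySem.Chars.startswith p [' '] then PySem.List.slice p (some 1) none else p) [' '] = true) := by
          intro hcon
          exact hcon.1 (by simp at h; omega)
        rw [if_neg hlast, hp1]
        simp [trimmed]
      · have hlen : 1 ≤ ps.length := by cases ps with | nil => exact absurd rfl hps | cons a b => simp
        have hne : (s : Int) ≠ n - 1 := by simp at h; omega
        rw [hp1]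
        by_cases he : PySem.Chars.endswith (dropLead p) [' '] = true
        · rw [if_pos ⟨hne, he⟩]
          have := hend (dropLead p)
          rw [if_pos he] at this
          rw [this]
          cases ps with
          | nil => exact absurd rfl hps
          | cons a b => simp [trimmed]
        · rw [if_neg (by intro hcon; exact he hcon.2)]
          have := hend (dropLead p)
          rw [if_neg he] at this
          rw [this]
          cases ps with
          | nil => exact absurd rfl hps
          | cons a b => simp [trimmed]
    · have hflag : (decide (s % 2 = 1)) = false := by simp [hs]
      have hflag2 : (decide ((s + 1) % 2 = 1)) = true := by simp; omega
      rw [hflag, hflag2]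
      show bTrim n (s : Int) p :: trimmed true ps = trimmed false (p :: ps)
      rw [bTrim, if_neg (by omega)]
      simp [trimmed]

-- ===== VERDICT (by name: the statement is the Claim_ definition above) =====
theorem delete_blank_spec : Claim_equal_delete_blank := by
  unfold Claim_equal_delete_blank
  intro input_str _
  unfold Spec_delete_blank delete_blank delete_blank_alt
  have hfree := splitOn_dollar_free input_str.toList
  have hA := (aLoop_main (input_str.toList.splitOn '$').length
    (input_str.toList.splitOn '$') le_rfl hfree).1 0 [] rfl
  rw [List.intercalate_splitOn input_str.toList '$'] at hA
  have hB := map_bTrim_eq_trimmed (input_str.toList.splitOn '$') 0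
    ((input_str.toList.splitOn '$').length : Int) (by simp)
  simp only [Nat.cast_zero] at hB
  rw [hA]
  show String.ofList _ = String.ofList (List.intercalate [Char.ofNat 36] _)
  rw [hB]
  simp
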